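-- pv_equiv track=rewrite | github.com/twinkleshinya/AI-m-OK-code | AI-m-OK.py | _best_werss_search_match
-- ===== SOURCE A (Python) =====
-- def _best_werss_search_match(account, rows):
--     if not rows:
--         return None
--     account_l = account.lower()
--     for row in rows:
--         nickname = str(row.get("nickname") or row.get("mp_name") or "").strip()
--         alias = str(row.get("alias") or row.get("username") or "").strip()
--         if nickname == account or nickname.lower() == account_l or alias.lower() == account_l:
--             return row
--     for row in rows:
--         nickname = str(row.get("nickname") or row.get("mp_name") or "").strip()
--         signature = str(row.get("signature") or row.get("mp_intro") or "").strip()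
--         if account_l in f"{nickname} {signature}".lower():
--             return row
--     return rows[0]
-- ===== SOURCE B (Python) =====
-- def _score(account, account_l, row):
--     # 0 = exact match, 1 = substring match, 2 = no match
--     nickname = str(row.get("nickname") or row.get("mp_name") or "").strip()
--     if nickname == account or nickname.lower() == account_l:
--         return 0
--     alias = str(row.get("alias") or row.get("username") or "").strip()
--     if alias.lower() == account_l:
--         return 0
--     signature = str(row.get("signature") or row.get("mp_intro") or "").strip()
--     if account_l in f"{nickname} {signature}".lower():
--         return 1
--     return 2
--
--
-- def _best_werss_search_match(account, rows):
--     # rank every row (0 exact / 1 substring / 2 none) and take the first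
--     # row with the minimal rank; all-rank-2 naturally yields rows[0].
--     if not rows:
--         return None
--     account_l = account.lower()
--     return min(rows, key=lambda row: _score(account, account_l, row))
-- ===== Notes on version B (the rewrite author's own statement) =====
-- stated objective: alternative
-- what changed: Replaced A's two staged scans (exact pass, then substring pass, then rows[0] fallback) by a scoring function that ranks each row 0/1/2 and a single min-by-key selection whose first-minimum rule subsumes all three cases.
import Mathlib
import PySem

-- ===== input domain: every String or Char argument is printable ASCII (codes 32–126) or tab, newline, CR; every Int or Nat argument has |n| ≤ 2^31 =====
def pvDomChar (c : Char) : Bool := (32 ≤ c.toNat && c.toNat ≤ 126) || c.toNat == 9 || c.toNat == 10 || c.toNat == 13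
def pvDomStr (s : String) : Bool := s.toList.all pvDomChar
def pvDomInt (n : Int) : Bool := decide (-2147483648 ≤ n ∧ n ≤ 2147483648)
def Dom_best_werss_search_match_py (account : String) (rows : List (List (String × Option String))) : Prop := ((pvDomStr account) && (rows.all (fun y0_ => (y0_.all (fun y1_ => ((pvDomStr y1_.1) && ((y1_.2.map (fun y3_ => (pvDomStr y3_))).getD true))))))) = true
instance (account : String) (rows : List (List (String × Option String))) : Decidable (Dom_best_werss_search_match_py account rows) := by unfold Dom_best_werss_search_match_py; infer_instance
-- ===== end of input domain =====

-- B replaces A's two staged scans (exact pass, substring pass, rows[0] fallback) by a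
-- 0/1/2 scoring of each row and one first-minimum selection; alternative decomposition, same results.
-- ===== PORT A =====
-- str(row.get(k1) or row.get(k2) or "").strip() : dict.get is first-match lookup; 'or' falls through on None and ""
def pvFieldA (row : List (String × Option String)) (k1 k2 : String) : String :=
  let v1 := (((PySem.Dict.mk row).get? k1).join).getD ""
  PySem.Str.strip (if v1 = "" then (((PySem.Dict.mk row).get? k2).join).getD "" else v1)

def pvExactA (account account_l : String) (row : List (String × Option String)) : Bool :=
  let nickname := pvFieldA row "nickname" "mp_name"
  let aliasv := pvFieldA row "alias" "username"
  nickname == account || PySem.Str.lower nickname == account_l || PySem.Str.lower aliasv == account_l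

def pvSubA (account_l : String) (row : List (String × Option String)) : Bool :=
  let nickname := pvFieldA row "nickname" "mp_name"
  let signature := pvFieldA row "signature" "mp_intro"
  PySem.Str.isIn account_l (PySem.Str.lower (PySem.Str.join " " [nickname, signature]))

def best_werss_search_match_py (account : String) (rows : List (List (String × Option String))) : Option (List (String × Option String)) :=
  match rows with
  | [] => none
  | r0 :: _ =>
    let account_l := PySem.Str.lower account
    match rows.find? (pvExactA account account_l) with
    | some row => some row
    | none =>
      match rows.find? (pvSubA account_l) with
      | some row => some row
      | none => some r0

-- ===== PORT B =====
-- Source B's _score: 0 = exact match, 1 = substring match, 2 = no match (field expressions inline, as in Source B)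
def pvScoreB (account account_l : String) (row : List (String × Option String)) : Nat :=
  let nv := (((PySem.Dict.mk row).get? "nickname").join).getD ""
  let nickname := PySem.Str.strip (if nv = "" then (((PySem.Dict.mk row).get? "mp_name").join).getD "" else nv)
  if nickname == account || PySem.Str.lower nickname == account_l then 0
  else
    let av := (((PySem.Dict.mk row).get? "alias").join).getD ""
    let aliasv := PySem.Str.strip (if av = "" then (((PySem.Dict.mk row).get? "username").join).getD "" else av)
    if PySem.Str.lower aliasv == account_l then 0
    else
      let sv := (((PySem.Dict.mk row).get? "signature").join).getD ""
      let signature := PySem.Str.strip (if sv = "" then (((PySem.Dict.mk row).get? "mp_intro").join).getD "" else sv)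
      if PySem.Str.isIn account_l (PySem.Str.lower (PySem.Str.join " " [nickname, signature])) then 1 else 2

-- Python's min(xs, key=f): fold keeping the current holder unless a STRICTLY smaller key appears
def pvMinBy (f : List (String × Option String) → Nat) (rows : List (List (String × Option String)))
    (acc : Option (List (String × Option String))) : Option (List (String × Option String)) :=
  match rows with
  | [] => acc
  | row :: rest =>
    match acc with
    | none => pvMinBy f rest (some row)
    | some b => pvMinBy f rest (if f row < f b then some row else some b)

def best_werss_search_match_py_alt (account : String) (rows : List (List (String × Option String))) : Option (List (String × Option String)) :=
  match rows with
  | [] => none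
  | _ :: _ => pvMinBy (pvScoreB account (PySem.Str.lower account)) rows none

-- ===== PRECONDITION & SPEC =====
def Spec_best_werss_search_match_py (account : String) (rows : List (List (String × Option String))) (out : Option (List (String × Option String))) : Prop := out = best_werss_search_match_py_alt account rows
instance (account : String) (rows : List (List (String × Option String))) (out : Option (List (String × Option String))) : Decidable (Spec_best_werss_search_match_py account rows out) := by unfold Spec_best_werss_search_match_py; infer_instance

-- ===== CLAIM (what is proved, stated in full; the proofs are below) =====
def Claim_equal_best_werss_search_match_py : Prop := ∀ (account : String) (rows : List (List (String × Option String))), Dom_best_werss_search_match_py account rows → Spec_best_werss_search_match_py account rows (best_werss_search_match_py account rows)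

-- ===== LEMMAS AND PROOFS =====

-- the 0/1/2 if-chain, over abstract Booleans
theorem pv_ite3_zero (c1 c2 c3 : Bool) :
    ((if c1 then (0:Nat) else if c2 then 0 else if c3 then 1 else 2) = 0) ↔ ((c1 || c2) = true) := by
  cases c1 <;> cases c2 <;> cases c3 <;> simp

theorem pv_ite3_one (c1 c2 c3 : Bool) :
    ((if c1 then (0:Nat) else if c2 then 0 else if c3 then 1 else 2) = 1) ↔
      (((c1 || c2) = false) ∧ c3 = true) := by
  cases c1 <;> cases c2 <;> cases c3 <;> simp

-- score 0 ↔ A's exact predicate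
theorem score_eq_zero_iff (account account_l : String) (row : List (String × Option String)) :
    (pvScoreB account account_l row = 0) ↔ pvExactA account account_l row = true := by
  simp only [pvScoreB, pvExactA, pvFieldA]
  rw [pv_ite3_zero]

-- score 1 ↔ not exact and A's substring predicate
theorem score_eq_one_iff (account account_l : String) (row : List (String × Option String)) :
    (pvScoreB account account_l row = 1) ↔
      (pvExactA account account_l row = false ∧ pvSubA account_l row = true) := by
  simp only [pvScoreB, pvExactA, pvSubA, pvFieldA]
  rw [pv_ite3_one]

theorem score_le_two (account account_l : String) (row : List (String × Option String)) :
    pvScoreB account account_l row ≤ 2 := by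
  simp only [pvScoreB]
  split_ifs <;> simp

-- holder of score 0 is never displaced
theorem pvMinBy_zero (f : List (String × Option String) → Nat) (b : List (String × Option String))
    (hb : f b = 0) : ∀ rows, pvMinBy f rows (some b) = some b := by
  intro rows
  induction rows with
  | nil => rfl
  | cons row rest ih => simp [pvMinBy, hb, ih]

-- holder of score 1 is displaced exactly by the first score-0 row
theorem pvMinBy_one (f : List (String × Option String) → Nat) (b : List (String × Option String))
    (hb : f b = 1) : ∀ rows, pvMinBy f rows (some b) =
      match rows.find? (fun r => f r == 0) with
      | some r => some r
      | none => some b := by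
  intro rows
  induction rows with
  | nil => rfl
  | cons row rest ih =>
    by_cases h0 : f row = 0
    · simp [pvMinBy, hb, h0, pvMinBy_zero f row h0]
    · have : ¬ f row < 1 := by omega
      simp [pvMinBy, hb, this, h0, ih]

-- holder of score 2: first score-0 row wins, else first score-1 row, else the holder
theorem pvMinBy_two (f : List (String × Option String) → Nat) (b : List (String × Option String))
    (hb : f b = 2) : ∀ rows, pvMinBy f rows (some b) =
      match rows.find? (fun r => f r == 0) with
      | some r => some r
      | none =>
        match rows.find? (fun r => f r == 1) with
        | some r => some r
        | none => some b := by
  intro rows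
  induction rows with
  | nil => rfl
  | cons row rest ih =>
    by_cases h0 : f row = 0
    · simp [pvMinBy, hb, h0, pvMinBy_zero f row h0]
    · by_cases h1 : f row = 1
      · simp [pvMinBy, hb, h1, pvMinBy_one f row h1]
      · have h2 : ¬ f row < 2 := by omega
        simp [pvMinBy, hb, h2, h0, h1, ih]

-- find? respects pointwise equality of predicates on the list's members
theorem find?_congr_mem {α : Type} (l : List α) (p q : α → Bool)
    (h : ∀ x ∈ l, p x = q x) : l.find? p = l.find? q := by
  induction l with
  | nil => rfl
  | cons a t ih =>
    have ha := h a (by simp)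
    simp only [List.find?_cons, ha]
    cases q a
    · exact ih (fun x hx => h x (by simp [hx]))
    · rfl

theorem best_werss_search_match_py_main (account : String)
    (rows : List (List (String × Option String))) :
    best_werss_search_match_py account rows = best_werss_search_match_py_alt account rows := by
  cases rows with
  | nil => rfl
  | cons r0 rest =>
    set al := PySem.Str.lower account with hal
    set f := pvScoreB account al with hf
    have hfind0 : ∀ l : List (List (String × Option String)),
        l.find? (fun r => f r == 0) = l.find? (pvExactA account al) := by
      intro l
      refine find?_congr_mem l _ _ (fun x _ => ?_)
      by_cases h : f x = 0
      · simp [h, ((score_eq_zero_iff account al x).mp h)]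
      · have := (score_eq_zero_iff account al x).not.mp h
        simp only [Bool.not_eq_true] at this
        simp [h, this]
    simp only [best_werss_search_match_py, best_werss_search_match_py_alt, pvMinBy, ← hal]
    by_cases h0 : f r0 = 0
    · rw [pvMinBy_zero f r0 h0]
      have hx := (score_eq_zero_iff account al r0).mp h0
      simp [hx]
    · have hxf : pvExactA account al r0 = false := by
        have := (score_eq_zero_iff account al r0).not.mp h0
        simp only [Bool.not_eq_true] at this; exact this
      by_cases h1 : f r0 = 1
      · rw [pvMinBy_one f r0 h1]
        have hs := (score_eq_one_iff account al r0).mp h1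
        rw [hfind0 rest]
        simp [hxf, hs.2]
      · have h2 : f r0 = 2 := by
          have hle : f r0 ≤ 2 := by rw [hf]; exact score_le_two account al r0
          omega
        rw [pvMinBy_two f r0 h2, hfind0 rest]
        have hsf : pvSubA al r0 = false := by
          by_contra hc
          simp only [Bool.not_eq_false] at hc
          exact h1 ((score_eq_one_iff account al r0).mpr ⟨hxf, hc⟩)
        simp only [List.find?_cons, hxf, hsf]
        cases hE : rest.find? (pvExactA account al) with
        | some r => simp
        | none =>
          -- no exact row in rest, so score-1 there coincides with A's substring predicate
          have hnone : ∀ x ∈ rest, pvExactA account al x = false := by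
            intro x hx
            simpa using List.find?_eq_none.mp hE x hx
          have hfind1 : rest.find? (fun r => f r == 1) = rest.find? (pvSubA al) := by
            refine find?_congr_mem rest _ _ (fun x hx => ?_)
            by_cases h : f x = 1
            · simp [h, ((score_eq_one_iff account al x).mp h).2]
            · have : pvSubA al x = false := by
                by_contra hc
                simp only [Bool.not_eq_false] at hc
                exact h ((score_eq_one_iff account al x).mpr ⟨hnone x hx, hc⟩)
              simp [h, this]
          rw [hfind1]

-- ===== VERDICT (by name: the statement is the Claim_ definition above) =====
theorem best_werss_search_match_py_spec : Claim_equal_best_werss_search_match_py := by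
  intro account rows _
  exact best_werss_search_match_py_main account rows
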